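-- pv_equiv track=rewrite | github.com/GarnetSunset/rgg_save_tool_py | rgg_save_tool.py | calculate_checksum_y6
-- ===== SOURCE A (Python) =====
-- def calculate_checksum_y6(data):
--     seed = 0x79BAA6BB6398B6F7
--     checksum = 0
--     add = 0
--     sz_result = 0
--
--     sz = len(data)
--     if sz < 0x15B0:
--         pass
--     else:
--         sz_result = sz
--         result64 = seed
--         excess64 = (result64 * sz) >> 64
--         sz_result -= excess64
--         sz_result = ((sz_result >> 1) + excess64) >> 12
--         sz -= sz_result * 0x15B0
--
--         for s in range(sz_result):
--             read = s * 0x15B0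
--             for i in range(0x15B0):
--                 add += data[i + read]
--                 checksum += add
--
--     read = sz_result * 0x15B0
--     if sz >= 0x10:
--         result64 = sz >> 4
--         result64 *= 0x10
--         sz -= result64
--         for i in range(result64):
--             add += data[i + read]
--             checksum += add
--         read += result64
--
--     for i in range(sz):
--         add += data[i + read]
--         checksum += add
--
--     result32 = 0x80078071
--     excess32 = ((result32 * add) >> 32) >> 15
--     add -= excess32 * 0xFFF1
--
--     result32 = 0x80078071
--     excess32 = ((result32 * checksum) >> 32) >> 15
--     checksum -= excess32 * 0xFFF1
--
--     checksum = (checksum << 16) | add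
--     return checksum
-- ===== SOURCE B (Python) =====
-- def calculate_checksum_y6(data):
--     total = 0
--     checksum = 0
--     for b in data:
--         total += b
--         checksum += total
--
--     excess = ((0x80078071 * total) >> 32) >> 15
--     total -= excess * 0xFFF1
--
--     excess = ((0x80078071 * checksum) >> 32) >> 15
--     checksum -= excess * 0xFFF1
--
--     return (checksum << 16) | total
-- ===== Notes on version B (the rewrite author's own statement) =====
-- stated objective: simpler
-- what changed: B drops A's 0x15B0-block / 16-block chunk bookkeeping and magic reciprocal block-count division, computing the running sum and prefix-sum checksum in one direct pass over the elements, then applies the identical magic-number reductions and packing.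
import Mathlib
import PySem

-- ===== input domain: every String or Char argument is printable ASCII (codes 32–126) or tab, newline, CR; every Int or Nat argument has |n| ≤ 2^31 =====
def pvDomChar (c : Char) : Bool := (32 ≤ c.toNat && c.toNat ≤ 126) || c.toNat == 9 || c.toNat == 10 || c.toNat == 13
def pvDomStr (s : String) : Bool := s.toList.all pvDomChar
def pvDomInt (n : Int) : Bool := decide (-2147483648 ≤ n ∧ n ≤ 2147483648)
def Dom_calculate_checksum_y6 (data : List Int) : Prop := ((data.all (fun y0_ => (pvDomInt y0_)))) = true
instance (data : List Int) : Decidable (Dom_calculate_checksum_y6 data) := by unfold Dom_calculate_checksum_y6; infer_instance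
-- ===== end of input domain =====

-- B replaces A's 0x15B0/16-block chunk bookkeeping (with its magic reciprocal block-count
-- division) by one direct pass over the elements, keeping the identical final reductions.


-- ===== PORT A =====
-- Python's '>>' on unbounded ints is exactly floor division by a power of two (also for negatives).
def pvShr (x : Int) (n : Nat) : Int := PySem.Int.floordiv x (2 ^ n)

-- body of A's (textually identical) three loops: add += data[i + read]; checksum += add.
-- pyGetD with default 0: Pre_ guarantees every index A generates is in range (= where Python returns).
def pvStepA (data : List Int) (read : Int) (ac : Int × Int) (i : Int) : Int × Int :=
  let add := ac.1 + PySem.List.pyGetD data (i + read) 0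
  (add, ac.2 + add)

-- A's three loop phases, returning the raw (add, checksum) pair; state (sz, sz_result/read, (add, checksum))
def pvLoopsA (data : List Int) : Int × Int :=
  let seed : Int := 0x79BAA6BB6398B6F7
  let sz : Int := (data.length : Int)
  let st : Int × Int × (Int × Int) :=
    if sz < 0x15B0 then (sz, 0, (0, 0))
    else
      let excess64 := pvShr (seed * sz) 64
      let sz_result := pvShr (pvShr (sz - excess64) 1 + excess64) 12
      let ac := (PySem.List.pyRange 0 sz_result 1).foldl
        (fun ac s => (PySem.List.pyRange 0 0x15B0 1).foldl (pvStepA data (s * 0x15B0)) ac) (0, 0)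
      (sz - sz_result * 0x15B0, sz_result, ac)
  let read : Int := st.2.1 * 0x15B0
  let st2 : Int × Int × (Int × Int) :=
    if st.1 ≥ 0x10 then
      let result64 := pvShr st.1 4 * 0x10
      (st.1 - result64, read + result64,
        (PySem.List.pyRange 0 result64 1).foldl (pvStepA data read) st.2.2)
    else (st.1, read, st.2.2)
  (PySem.List.pyRange 0 st2.1 1).foldl (pvStepA data st2.2.1) st2.2.2

def calculate_checksum_y6 (data : List Int) : Int :=
  let ac := pvLoopsA data
  let add := ac.1
  let checksum := ac.2
  let excess32 := pvShr (pvShr (0x80078071 * add) 32) 15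
  let add := add - excess32 * 0xFFF1
  let excess32 := pvShr (pvShr (0x80078071 * checksum) 32) 15
  let checksum := checksum - excess32 * 0xFFF1
  PySem.Int.bor (checksum * 2 ^ 16) add

-- ===== PORT B =====
-- body of B's single loop: total += b; checksum += total
def pvStepB (ac : Int × Int) (b : Int) : Int × Int :=
  let total := ac.1 + b
  (total, ac.2 + total)

def calculate_checksum_y6_alt (data : List Int) : Int :=
  let ac := data.foldl pvStepB (0, 0)
  let total := ac.1
  let checksum := ac.2
  let excess := pvShr (pvShr (0x80078071 * total) 32) 15
  let total := total - excess * 0xFFF1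
  let excess := pvShr (pvShr (0x80078071 * checksum) 32) 15
  let checksum := checksum - excess * 0xFFF1
  PySem.Int.bor (checksum * 2 ^ 16) total

-- ===== PRECONDITION & SPEC =====
-- Pre_ excludes lists of length ≥ 2^64 (never materialisable in practice): there A's 64-bit
-- magic-reciprocal block count can overshoot the list (first overshoot near length 4.6e19,
-- which is ≥ 2^64) and A raises IndexError.
def Pre_calculate_checksum_y6 (data : List Int) : Prop := data.length < 2 ^ 64
instance (data : List Int) : Decidable (Pre_calculate_checksum_y6 data) := by unfold Pre_calculate_checksum_y6; infer_instance
def pvWitness_calculate_checksum_y6 : List Int := [1, 2, 3]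

def Spec_calculate_checksum_y6 (data : List Int) (out : Int) : Prop := out = calculate_checksum_y6_alt data
instance (data : List Int) (out : Int) : Decidable (Spec_calculate_checksum_y6 data out) := by unfold Spec_calculate_checksum_y6; infer_instance

-- ===== CLAIM (what is proved, stated in full; the proofs are below) =====
def Claim_equal_calculate_checksum_y6 : Prop := ∀ (data : List Int), Dom_calculate_checksum_y6 data → Pre_calculate_checksum_y6 data → Spec_calculate_checksum_y6 data (calculate_checksum_y6 data)

-- ===== LEMMAS AND PROOFS =====

-- one contiguous index segment of A's loops equals a direct fold over that segment of the list
lemma foldA_seg (data : List Int) (r s : Nat) (h : r + s ≤ data.length) (ac : Int × Int) :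
    (PySem.List.pyRange 0 (↑s) 1).foldl (pvStepA data ↑r) ac
      = ((data.drop r).take s).foldl pvStepB ac := by
  rw [PySem.List.pyRange_zero_natCast, List.foldl_map]
  induction s with
  | zero => simp
  | succ n ih =>
    rw [List.range_succ, List.foldl_append, List.take_add_one]
    simp only [List.foldl_cons, List.foldl_nil]
    rw [ih (by omega)]
    have hget : (data.drop r)[n]? = some (data.getD (r + n) 0) := by
      rw [List.getElem?_drop, List.getElem?_eq_getElem (by omega), List.getD_eq_getElem _ _ (by omega)]
    rw [hget]
    simp only [Option.toList_some, List.foldl_append, List.foldl_cons, List.foldl_nil]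
    simp only [pvStepA, pvStepB, show ((n : Int) + r) = ((r + n : Nat) : Int) by push_cast; ring,
      PySem.List.pyGetD_natCast]

-- the three phases chained (lengths M, a, b partitioning the list) equal one fold over the list
lemma pvTail (data : List Int) (M a b : Nat) (hab : M + a + b = data.length) :
    (PySem.List.pyRange 0 (↑b) 1).foldl (pvStepA data ↑(M + a))
        ((PySem.List.pyRange 0 (↑a) 1).foldl (pvStepA data ↑M)
          ((data.take M).foldl pvStepB (0, 0)))
      = data.foldl pvStepB (0, 0) := by
  rw [foldA_seg data M a (by omega), foldA_seg data (M + a) b (by omega)]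
  conv_rhs => rw [← List.take_append_drop M data, List.foldl_append,
    ← List.take_append_drop a (data.drop M), List.foldl_append, List.drop_drop]
  rw [List.take_of_length_le (l := data.drop (M + a)) (by simp; omega)]

-- A's big-block double loop equals a direct fold over the first q*0x15B0 elements
lemma foldA_blocks (data : List Int) (q : Nat) (h : 5552 * q ≤ data.length) :
    (List.range q).foldl (fun (x : Int × Int) (k : Nat) =>
        (PySem.List.pyRange 0 0x15B0 1).foldl (pvStepA data ((k : Int) * 0x15B0)) x) (0, 0)
      = (data.take (5552 * q)).foldl pvStepB (0, 0) := by
  induction q with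
  | zero => simp
  | succ n ih =>
    rw [List.range_succ, List.foldl_append]
    simp only [List.foldl_cons, List.foldl_nil]
    rw [ih (by omega)]
    rw [show ((n : Int) * 0x15B0) = ((5552 * n : Nat) : Int) by push_cast; ring,
      show (0x15B0 : Int) = ((5552 : Nat) : Int) by norm_num,
      foldA_seg data (5552 * n) 5552 (by omega),
      show 5552 * (n + 1) = 5552 * n + 5552 by ring,
      List.take_add, List.foldl_append]

-- phases 2+3 when at least 16 elements remain after the first M
lemma pvTail16 (data : List Int) (M : Nat) (hM : M ≤ data.length) :
    (PySem.List.pyRange 0 (((data.length - M : Nat) : Int) - pvShr ((data.length - M : Nat) : Int) 4 * 0x10) 1).foldl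
        (pvStepA data ((M : Int) + pvShr ((data.length - M : Nat) : Int) 4 * 0x10))
        ((PySem.List.pyRange 0 (pvShr ((data.length - M : Nat) : Int) 4 * 0x10) 1).foldl
          (pvStepA data (M : Int)) ((data.take M).foldl pvStepB (0, 0)))
      = data.foldl pvStepB (0, 0) := by
  set m : Nat := data.length - M with hm
  have hdiv : pvShr ((m : Nat) : Int) 4 * 0x10 = ((m / 16 * 16 : Nat) : Int) := by
    unfold pvShr
    rw [show ((2 : Int) ^ 4) = ((16 : Nat) : Int) by norm_num, PySem.Int.floordiv_natCast]
    push_cast; ring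
  rw [hdiv,
    show ((m : Nat) : Int) - ((m / 16 * 16 : Nat) : Int) = ((m - m / 16 * 16 : Nat) : Int) by omega,
    show ((M : Nat) : Int) + ((m / 16 * 16 : Nat) : Int) = ((M + m / 16 * 16 : Nat) : Int) by
      push_cast; ring]
  exact pvTail data M (m / 16 * 16) (m - m / 16 * 16) (by omega)

-- phase 3 alone, covering whatever remains after the first M elements
lemma pvTailSmall (data : List Int) (M : Nat) (hM : M ≤ data.length) :
    (PySem.List.pyRange 0 ((data.length - M : Nat) : Int) 1).foldl
        (pvStepA data (M : Int)) ((data.take M).foldl pvStepB (0, 0))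
      = data.foldl pvStepB (0, 0) := by
  have h := pvTail data M 0 (data.length - M) (by omega)
  simpa using h

-- A's loops compute the same raw pair as B's single pass, for any list shorter than 2^64
lemma pvLoopsA_eq (data : List Int) (hpre : data.length < 2 ^ 64) :
    pvLoopsA data = data.foldl pvStepB (0, 0) := by
  simp only [pvLoopsA]
  by_cases h1 : ((data.length : Int) < 0x15B0)
  · rw [if_pos h1]
    dsimp only
    by_cases h16 : ((data.length : Int) ≥ 0x10)
    · rw [if_pos h16]
      dsimp only
      have h := pvTail16 data 0 (by omega)
      simpa using h
    · rw [if_neg h16]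
      dsimp only
      have h := pvTailSmall data 0 (by omega)
      simpa using h
  · rw [if_neg h1]
    dsimp only
    set E : Int := pvShr (8771506548017510135 * (data.length : Int)) 64 with hE
    set T : Int := pvShr ((data.length : Int) - E) 1 with hT
    set Q : Int := pvShr (T + E) 12 with hQ
    have e1 : E * 2 ^ 64 ≤ 8771506548017510135 * (data.length : Int) := by
      rw [hE]; unfold pvShr
      exact (PySem.Int.le_floordiv_iff_mul_le (by norm_num)).mp le_rfl
    have e2 : 8771506548017510135 * (data.length : Int) < (E + 1) * 2 ^ 64 := by
      rw [hE]; unfold pvShr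
      exact (PySem.Int.floordiv_lt_iff_lt_mul (by norm_num)).mp (lt_add_one _)
    have t1 : T * 2 ≤ (data.length : Int) - E := by
      rw [hT]; unfold pvShr
      exact (PySem.Int.le_floordiv_iff_mul_le (by norm_num)).mp le_rfl
    have t2 : (data.length : Int) - E < (T + 1) * 2 := by
      rw [hT]; unfold pvShr
      exact (PySem.Int.floordiv_lt_iff_lt_mul (by norm_num)).mp (lt_add_one _)
    have q1 : Q * 2 ^ 12 ≤ T + E := by
      rw [hQ]; unfold pvShr
      exact (PySem.Int.le_floordiv_iff_mul_le (by norm_num)).mp le_rfl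
    have q2 : T + E < (Q + 1) * 2 ^ 12 := by
      rw [hQ]; unfold pvShr
      exact (PySem.Int.floordiv_lt_iff_lt_mul (by norm_num)).mp (lt_add_one _)
    -- A's magic reciprocal block count never overshoots a list shorter than 2^64
    have hkey : 0 ≤ Q ∧ 5552 * Q ≤ (data.length : Int) := by
      have e1' : 2 ^ 64 * E ≤ 8771506548017510135 * (data.length : Int) := by linarith
      have e2' : 8771506548017510135 * (data.length : Int) < 2 ^ 64 * E + 2 ^ 64 := by linarith
      have t1' : 2 * T ≤ (data.length : Int) - E := by linarith
      have t2' : (data.length : Int) - E < 2 * T + 2 := by linarith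
      have q1' : 4096 * Q ≤ T + E := by linarith
      have q2' : T + E < 4096 * Q + 4096 := by linarith
      omega
    rw [show Q = ((Q.toNat : Nat) : Int) by omega]
    rw [PySem.List.pyRange_zero_natCast, List.foldl_map]
    rw [foldA_blocks data Q.toNat (by omega)]
    rw [show (((Q.toNat : Nat) : Int) * 5552) = ((5552 * Q.toNat : Nat) : Int) by push_cast; ring]
    rw [show ((data.length : Int) - ((5552 * Q.toNat : Nat) : Int))
        = ((data.length - 5552 * Q.toNat : Nat) : Int) by
      rw [Nat.cast_sub (by omega)]]
    by_cases h16 : (((data.length - 5552 * Q.toNat : Nat) : Int) ≥ 0x10)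
    · rw [if_pos h16]
      dsimp only
      exact pvTail16 data (5552 * Q.toNat) (by omega)
    · rw [if_neg h16]
      dsimp only
      exact pvTailSmall data (5552 * Q.toNat) (by omega)

-- ===== VERDICT (by name: the statement is the Claim_ definition above) =====
theorem calculate_checksum_y6_spec : Claim_equal_calculate_checksum_y6 := by
  intro data hdom hpre
  unfold Spec_calculate_checksum_y6 calculate_checksum_y6 calculate_checksum_y6_alt
  rw [pvLoopsA_eq data hpre]
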